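-- pv_equiv track=rewrite | github.com/Cycyber/CCPS109---Computer-Science-1 | labs109.py | duplicate_digit_bonus
-- ===== SOURCE A (Python) =====
-- def duplicate_digit_bonus(n):
--     num = str(n)  # 43333
--     score = 0
--     k = 1
--     x = num[0]
--     for i in range(1, len(str(n))):  # 1-(5-1)
--         if x == num[i]:
--             k += 1
--             if i + 1 == len(str(n)):
--                 score += 2 * 10 ** (k - 2)
--         else:
--             if k >= 2:
--                 score += 10 ** (k - 2)
--             k = 1
--         x = num[i]  # 4 3 3 3
--     return score
-- ===== SOURCE B (Python) =====
-- def _runs(s):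
--     # run lengths of s: count the leading run, recurse on the remainder
--     if not s:
--         return []
--     i = 1
--     while i < len(s) and s[i] == s[0]:
--         i += 1
--     return [i] + _runs(s[i:])
--
--
-- def duplicate_digit_bonus(n):
--     lens = _runs(str(n))
--     score = sum(10 ** (L - 2) for L in lens if L >= 2)
--     if lens and lens[-1] >= 2:
--         score += 10 ** (lens[-1] - 2)
--     return score
-- ===== Notes on version B (the rewrite author's own statement) =====
-- stated objective: idiomatic
-- what changed: B separates run collection from scoring: it first run-length-encodes str(n) into a list of run lengths, then sums the per-run bonus over the long runs and adds one extra bonus term for the final run, instead of A's single stateful index loop with an in-loop end-of-string check.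
import Mathlib
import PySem

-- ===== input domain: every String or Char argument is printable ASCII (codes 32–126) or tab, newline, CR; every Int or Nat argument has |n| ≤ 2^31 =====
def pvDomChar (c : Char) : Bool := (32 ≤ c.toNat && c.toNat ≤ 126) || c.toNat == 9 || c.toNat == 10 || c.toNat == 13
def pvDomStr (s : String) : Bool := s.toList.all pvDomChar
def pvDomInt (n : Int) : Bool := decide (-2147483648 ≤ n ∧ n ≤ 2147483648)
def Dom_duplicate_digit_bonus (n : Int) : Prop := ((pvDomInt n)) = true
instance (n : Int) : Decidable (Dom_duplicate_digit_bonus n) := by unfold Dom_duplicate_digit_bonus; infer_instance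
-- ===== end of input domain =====

-- B separates run collection from scoring (run-length encode, then sum with the final run doubled); same O(d) cost, different decomposition.


-- ===== PORT A =====
-- body of A's for-loop; state = (score, k, x)
def pvAStep (num : List Char) : Int × Int × Char → Int → Int × Int × Char
  | (score, k, x), i =>
    let c := PySem.List.pyGetD num i ' '   -- num[i]; 1 ≤ i < len(num) along the range, so in range
    if x = c then
      let k := k + 1
      -- k ≥ 2 here (just incremented from ≥ 1), so Python's exponent k-2 is ≥ 0 and .toNat is exact
      (if i + 1 = (num.length : Int) then score + 2 * 10 ^ (k - 2).toNat else score, k, c)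
    else
      (if 2 ≤ k then score + 10 ^ (k - 2).toNat else score, 1, c)

def duplicate_digit_bonus (n : Int) : Int :=
  let num := PySem.Int.toChars n
  -- num[0]: str(n) is never empty, so index 0 is in range and pyGetD is exact
  (((PySem.List.pyRange 1 (num.length) 1).foldl (pvAStep num)
      (0, 1, PySem.List.pyGetD num 0 ' '))).1

-- ===== PORT B =====
-- the while loop of _runs: how many chars at the front of `rest` equal c
def pvRunLen (c : Char) : List Char → Nat
  | [] => 0
  | d :: rest => if d = c then pvRunLen c rest + 1 else 0

-- _runs: run lengths of s (leading run, then recurse on s[i:])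
def pvRuns : List Char → List Int
  | [] => []
  | c :: rest =>
      let i := pvRunLen c rest + 1
      ((i : Nat) : Int) :: pvRuns ((c :: rest).drop i)
termination_by s => s.length
decreasing_by simp [List.length_drop]

def duplicate_digit_bonus_alt (n : Int) : Int :=
  let lens := pvRuns (PySem.Int.toChars n)
  let score := ((lens.filter (fun L => decide (2 ≤ L))).map (fun L => (10:Int) ^ (L - 2).toNat)).sum
  match lens.getLast? with  -- lens[-1] on a nonempty list is getLast?; `if lens and …` guards the none case
  | some L => if 2 ≤ L then score + 10 ^ (L - 2).toNat else score
  | none => score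

-- ===== PRECONDITION & SPEC =====
def Spec_duplicate_digit_bonus (n : Int) (out : Int) : Prop := out = duplicate_digit_bonus_alt n
instance (n : Int) (out : Int) : Decidable (Spec_duplicate_digit_bonus n out) := by unfold Spec_duplicate_digit_bonus; infer_instance

-- ===== CLAIM (what is proved, stated in full; the proofs are below) =====
def Claim_equal_duplicate_digit_bonus : Prop := ∀ (n : Int), Dom_duplicate_digit_bonus n → Spec_duplicate_digit_bonus n (duplicate_digit_bonus n)

-- ===== LEMMAS AND PROOFS =====

-- A's loop as structural recursion over the remaining characters
def pvALoop (x : Char) (k score : Int) : List Char → Int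
  | [] => score
  | c :: rest =>
      if x = c then
        pvALoop c (k + 1) (if rest = [] then score + 2 * 10 ^ ((k + 1) - 2).toNat else score) rest
      else
        pvALoop c 1 (if 2 ≤ k then score + 10 ^ (k - 2).toNat else score) rest

-- what A's loop adds to score
def pvPayoff (x : Char) (k : Int) : List Char → Int
  | [] => 0
  | c :: rest =>
      if x = c then
        (if rest = [] then 2 * 10 ^ ((k + 1) - 2).toNat else 0) + pvPayoff c (k + 1) rest
      else
        (if 2 ≤ k then 10 ^ (k - 2).toNat else 0) + pvPayoff c 1 rest

-- run lengths of the whole string given a current run of x of length k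
def pvRunsFrom (x : Char) (k : Int) : List Char → List Int
  | [] => [k]
  | c :: rest => if x = c then pvRunsFrom c (k + 1) rest else k :: pvRunsFrom c 1 rest

lemma pvRuns_nil : pvRuns [] = [] := by rw [pvRuns]

lemma pvRuns_cons (c : Char) (rest : List Char) :
    pvRuns (c :: rest)
      = ((pvRunLen c rest + 1 : Nat) : Int) :: pvRuns ((c :: rest).drop (pvRunLen c rest + 1)) := by
  rw [pvRuns]

-- B's score of a list of run lengths
def pvS (lens : List Int) : Int :=
  ((lens.filter (fun L => decide (2 ≤ L))).map (fun L => (10:Int) ^ (L - 2).toNat)).sum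
    + (match lens.getLast? with
       | some L => if 2 ≤ L then (10:Int) ^ (L - 2).toNat else 0
       | none => 0)

lemma toDigitsCore_cons_ne_nil : ∀ (f n : Nat) (c : Char) (acc : List Char),
    Nat.toDigitsCore 10 f n (c :: acc) ≠ [] := by
  intro f
  induction f with
  | zero => intro n c acc; simp [Nat.toDigitsCore]
  | succ f ih =>
      intro n c acc
      simp only [Nat.toDigitsCore]
      split
      · simp
      · exact ih _ _ _

lemma toChars_ne_nil (n : Int) : PySem.Int.toChars n ≠ [] := by
  have h : ∀ m : Nat, Nat.toDigits 10 m ≠ [] := by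
    intro m
    simp only [Nat.toDigits, Nat.toDigitsCore]
    split
    · simp
    · exact toDigitsCore_cons_ne_nil _ _ _ _
  unfold PySem.Int.toChars
  split
  · simp
  · exact h _

lemma pvALoop_payoff : ∀ (suf : List Char) (x : Char) (k score : Int),
    pvALoop x k score suf = score + pvPayoff x k suf := by
  intro suf
  induction suf with
  | nil => intro x k score; simp [pvALoop, pvPayoff]
  | cons c rest ih =>
      intro x k score
      simp only [pvALoop, pvPayoff]
      by_cases hx : x = c
      · simp only [if_pos hx, ih]
        by_cases hr : rest = [] <;> simp [hr] <;> ring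
      · simp only [if_neg hx, ih]
        by_cases hk : 2 ≤ k <;> simp [hk] <;> ring

lemma pvRunsFrom_ne_nil : ∀ (suf : List Char) (x : Char) (k : Int), pvRunsFrom x k suf ≠ [] := by
  intro suf
  induction suf with
  | nil => intro x k; simp [pvRunsFrom]
  | cons c rest ih =>
      intro x k
      simp only [pvRunsFrom]
      split
      · exact ih _ _
      · simp

lemma pvS_cons (L : Int) (ls : List Int) (h : ls ≠ []) :
    pvS (L :: ls) = (if 2 ≤ L then (10:Int) ^ (L - 2).toNat else 0) + pvS ls := by
  obtain ⟨a, as, rfl⟩ := List.exists_cons_of_ne_nil h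
  simp only [pvS, List.getLast?_cons_cons, List.filter_cons]
  by_cases hL : 2 ≤ L <;> simp [hL] <;> ring

lemma pvPayoff_S : ∀ (suf : List Char) (x : Char) (k : Int), 1 ≤ k →
    pvPayoff x k suf
      = pvS (pvRunsFrom x k suf) - (if suf = [] ∧ 2 ≤ k then 2 * (10:Int) ^ (k - 2).toNat else 0) := by
  intro suf
  induction suf with
  | nil =>
      intro x k hk
      simp only [pvPayoff, pvRunsFrom, pvS]
      by_cases hk2 : 2 ≤ k <;> simp [hk2] <;> try ring
  | cons c rest ih =>
      intro x k hk
      simp only [pvPayoff, pvRunsFrom]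
      by_cases hx : x = c
      · simp only [if_pos hx]
        rw [ih c (k + 1) (by omega)]
        have h2 : (2:Int) ≤ k + 1 := by omega
        by_cases hr : rest = []
        · subst hr
          simp only [pvRunsFrom]
          simp [h2]
        · simp [hr]
      · simp only [if_neg hx]
        rw [ih c 1 (by omega)]
        have h1 : ¬ (2 ≤ (1:Int)) := by omega
        simp only [h1, and_false, if_false, sub_zero, List.cons_ne_nil, false_and]
        rw [pvS_cons k _ (pvRunsFrom_ne_nil _ _ _)]

lemma pvRunsFrom_runs : ∀ (rest : List Char) (c : Char) (k : Int),
    pvRunsFrom c k rest = (k + (pvRunLen c rest : Int)) :: pvRuns ((c :: rest).drop (pvRunLen c rest + 1)) := by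
  intro rest
  induction rest with
  | nil => intro c k; simp [pvRunsFrom, pvRunLen, pvRuns_nil]
  | cons d r ih =>
      intro c k
      by_cases hd : d = c
      · subst hd
        simp only [pvRunsFrom, pvRunLen, if_true]
        rw [ih d (k + 1)]
        have hdrop : (d :: d :: r).drop (pvRunLen d r + 1 + 1) = (d :: r).drop (pvRunLen d r + 1) := by
          simp [List.drop_succ_cons]
        rw [hdrop]
        simp only [List.cons.injEq]
        exact ⟨by push_cast; ring, trivial⟩
      · have hdc : ¬ (c = d) := fun h => hd h.symm
        simp only [pvRunsFrom, if_neg hdc, pvRunLen, if_neg hd]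
        rw [ih d 1]
        have hdrop : List.drop (0 + 1) (c :: d :: r) = d :: r := by simp
        rw [hdrop, pvRuns_cons]
        simp only [List.cons.injEq, and_true]
        exact ⟨by push_cast; ring, by push_cast; ring⟩

lemma pvRuns_eq_runsFrom (c : Char) (rest : List Char) :
    pvRuns (c :: rest) = pvRunsFrom c 1 rest := by
  rw [pvRunsFrom_runs]
  conv_lhs => rw [pvRuns]
  congr 1
  push_cast
  ring

lemma foldA : ∀ (suf pre : List Char) (score k : Int) (x : Char), pre ≠ [] →
    (((PySem.List.pyRange (pre.length : Int) (((pre ++ suf).length : Nat) : Int) 1).foldl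
        (pvAStep (pre ++ suf)) (score, k, x))).1 = pvALoop x k score suf := by
  intro suf
  induction suf with
  | nil =>
      intro pre score k x _
      rw [List.append_nil, PySem.List.pyRange_one_eq_nil (by omega)]
      simp [pvALoop]
  | cons c rest ih =>
      intro pre score k x hpre
      have hlen : ((pre ++ c :: rest).length : Int) = (pre.length : Int) + 1 + rest.length := by
        simp; omega
      have hlt : (pre.length : Int) < ((pre ++ c :: rest).length : Int) := by rw [hlen]; omega
      rw [PySem.List.pyRange_one_cons hlt]
      simp only [List.foldl_cons]
      have hget : PySem.List.pyGetD (pre ++ c :: rest) (pre.length : Int) ' ' = c := by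
        rw [PySem.List.pyGetD_natCast]
        simp [List.getD]
      have hstep : pvAStep (pre ++ c :: rest) (score, k, x) (pre.length : Int)
          = if x = c then
              ((if rest = [] then score + 2 * 10 ^ ((k + 1) - 2).toNat else score), k + 1, c)
            else
              ((if 2 ≤ k then score + 10 ^ (k - 2).toNat else score), 1, c) := by
        simp only [pvAStep, hget]
        by_cases hx : x = c
        · simp only [if_pos hx]
          by_cases hr : rest = []
          · simp [hr]
          · simp [hr]
        · simp [hx]
      rw [hstep]
      have happ : pre ++ c :: rest = (pre ++ [c]) ++ rest := by simp
      have hlen2 : (pre.length : Int) + 1 = ((pre ++ [c]).length : Nat) := by simp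
      by_cases hx : x = c
      · simp only [if_pos hx]
        rw [hlen2, happ]
        rw [ih (pre ++ [c]) _ (k + 1) c (by simp)]
        simp [pvALoop, hx]
      · simp only [if_neg hx]
        rw [hlen2, happ]
        rw [ih (pre ++ [c]) _ 1 c (by simp)]
        simp [pvALoop, hx]

lemma alt_eq_pvS (n : Int) : duplicate_digit_bonus_alt n = pvS (pvRuns (PySem.Int.toChars n)) := by
  simp only [duplicate_digit_bonus_alt, pvS]
  cases h : (pvRuns (PySem.Int.toChars n)).getLast? with
  | none => simp
  | some L => by_cases hL : 2 ≤ L <;> simp [hL]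

-- ===== VERDICT (by name: the statement is the Claim_ definition above) =====
theorem duplicate_digit_bonus_spec : Claim_equal_duplicate_digit_bonus := by
  intro n _
  unfold Spec_duplicate_digit_bonus
  obtain ⟨c, rest, hcs⟩ := List.exists_cons_of_ne_nil (toChars_ne_nil n)
  rw [alt_eq_pvS]
  simp only [duplicate_digit_bonus, hcs]
  have hget0 : PySem.List.pyGetD (c :: rest) (0 : Int) ' ' = c := by
    simp [PySem.List.pyGetD_ofNat']
  rw [hget0]
  have hfin : pvALoop c 1 0 rest = pvS (pvRuns (c :: rest)) := by
    rw [pvALoop_payoff, pvPayoff_S rest c 1 (by omega), pvRuns_eq_runsFrom]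
    have h2 : ¬ (2 ≤ (1:Int)) := by omega
    simp [h2]
  have hfold := foldA rest [c] 0 1 c (by simp)
  simp only [List.singleton_append, List.length_singleton] at hfold
  push_cast at hfold ⊢
  rw [hfold, hfin]
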